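-- pv_equiv track=rewrite | github.com/asyrafhia/-Asyraf-Ilmansyah-Hia-_Ujian_Modul1_JCDS_BKS | backwardsPrime.py | backwardsPrime
-- ===== SOURCE A (Python) =====
-- def backwardsPrime(start, stop):
--
--     def prime_num(num):
--         prime_tab = []
--         for i in range(2,num+1):
--             if num % i == 0:
--                 prime_tab.append(True)
--         if sum(prime_tab) == 1:
--             return True
--         else:
--             return False
--     check_prime = []
--     backward_prime = []
--
--     for prime in range(start, stop+1):
--         if prime_num(prime):
--             check_prime.append(prime)
--
--     for j in check_prime:
--         if prime_num(int(str(j)[::-1])) and j > 11: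
--             backward_prime.append(j)
--
--     return backward_prime
-- ===== SOURCE B (Python) =====
-- def backwardsPrime(start, stop):
--     # sqrt trial-division primality in a single pass, instead of a scan of all divisors in two passes
--     def is_prime(n):
--         if n < 2:
--             return False
--         i = 2
--         while i * i <= n:
--             if n % i == 0:
--                 return False
--             i += 1
--         return True
--     return [n for n in range(max(start, 12), stop + 1)
--             if is_prime(n) and is_prime(int(str(n)[::-1]))]
-- ===== Notes on version B (the rewrite author's own statement) =====
-- stated objective: alternative
-- what changed: Replaces the divisor-counting primality test (scan of all i in [2,n], run over two separate passes) by sqrt trial division inside a single comprehension that starts at max(start,12).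
import Mathlib
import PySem

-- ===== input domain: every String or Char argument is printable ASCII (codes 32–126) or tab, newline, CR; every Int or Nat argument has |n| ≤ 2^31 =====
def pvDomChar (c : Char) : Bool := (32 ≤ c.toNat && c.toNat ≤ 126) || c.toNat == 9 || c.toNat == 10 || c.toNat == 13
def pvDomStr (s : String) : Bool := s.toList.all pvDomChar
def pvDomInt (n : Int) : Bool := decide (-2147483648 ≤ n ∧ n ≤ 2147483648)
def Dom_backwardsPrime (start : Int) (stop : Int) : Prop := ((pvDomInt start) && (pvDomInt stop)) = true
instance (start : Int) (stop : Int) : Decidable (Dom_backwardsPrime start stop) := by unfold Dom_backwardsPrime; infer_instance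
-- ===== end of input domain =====

-- B replaces A's divisor-counting primality test (a scan of ALL i in [2,n], run in two passes)
-- by sqrt trial division in a single comprehension; the return value is proved identical everywhere.

-- shared helper: the expression int(str(j)[::-1]) appears verbatim in both Pythons.
-- .getD 0 : int() never raises here — its argument is the reversed digit string of a nonnegative integer.
def pvRevInt (j : Int) : Int :=
  ((PySem.Str.slice? (PySem.Int.toStr j) none none (-1)).bind PySem.Int.ofStr?).getD 0

-- ===== PORT A =====
-- prime_num: prime_tab collects one entry (True = 1 under sum()) per divisor; sum(prime_tab) == 1
def pvPrimeNum (num : Int) : Bool :=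
  let prime_tab : List Int :=
    (PySem.List.pyRange 2 (num + 1) 1).foldl
      (fun acc i => if PySem.Int.mod num i == 0 then acc ++ [1] else acc) []
  if prime_tab.sum == 1 then true else false

def backwardsPrime (start : Int) (stop : Int) : List Int :=
  let check_prime : List Int :=
    (PySem.List.pyRange start (stop + 1) 1).foldl
      (fun acc p => if pvPrimeNum p then acc ++ [p] else acc) []
  check_prime.foldl
    (fun acc j => if pvPrimeNum (pvRevInt j) && decide (11 < j) then acc ++ [j] else acc) []

-- ===== PORT B =====
-- while i * i <= n: trial division up to the square root
def pvTrial (n : Int) (i : Int) : Bool :=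
  if h : i * i ≤ n then
    if PySem.Int.mod n i == 0 then false else pvTrial n (i + 1)
  else true
termination_by (n + 1 - i).toNat
decreasing_by
  have hi : i ≤ n := by
    rcases lt_or_ge 0 i with h0 | h0
    · nlinarith
    · nlinarith
  omega

def pvIsPrimeB (n : Int) : Bool :=
  if n < 2 then false else pvTrial n 2

def backwardsPrime_alt (start : Int) (stop : Int) : List Int :=
  (PySem.List.pyRange (max start 12) (stop + 1) 1).filter
    (fun n => pvIsPrimeB n && pvIsPrimeB (pvRevInt n))

-- ===== PRECONDITION & SPEC =====
def Spec_backwardsPrime (start : Int) (stop : Int) (out : List Int) : Prop := out = backwardsPrime_alt start stop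
instance (start : Int) (stop : Int) (out : List Int) : Decidable (Spec_backwardsPrime start stop out) := by unfold Spec_backwardsPrime; infer_instance

-- ===== CLAIM (what is proved, stated in full; the proofs are below) =====
def Claim_equal_backwardsPrime : Prop := ∀ (start : Int) (stop : Int), Dom_backwardsPrime start stop → Spec_backwardsPrime start stop (backwardsPrime start stop)

-- ===== LEMMAS AND PROOFS =====

-- A's prime_num counts the divisors of num in [2, num] and tests the count against 1
lemma pvPrimeNum_eq_countP (num : Int) :
    pvPrimeNum num =
      decide ((PySem.List.pyRange 2 (num + 1) 1).countP
        (fun i => PySem.Int.mod num i == 0) = 1) := by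
  unfold pvPrimeNum
  rw [PySem.List.foldl_append_if (fun i => PySem.Int.mod num i == 0) (fun _ => (1 : Int))]
  simp [List.countP_eq_length_filter]

-- B's trial loop: true iff no k >= i with k*k <= n divides n
lemma pvTrial_iff (n i : Int) (hi : 0 <= i) :
    pvTrial n i = true ↔ ∀ k : Int, i ≤ k → k * k ≤ n → ¬ k ∣ n := by
  fun_induction pvTrial n i with
  | case1 i h hmod =>
    -- n % i == 0 : the loop returns False; k := i witnesses a divisor
    simp only [Bool.false_eq_true, false_iff]
    intro hall
    exact hall i le_rfl h ((PySem.Int.mod_eq_zero_iff_dvd n i).mp (by simpa using hmod))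
  | case2 i h hmod ih =>
    rw [ih (by omega)]
    constructor
    · intro hall k hik hkk
      rcases eq_or_lt_of_le hik with rfl | hlt
      · intro hdvd
        exact absurd ((PySem.Int.mod_eq_zero_iff_dvd n i).mpr hdvd) (by simpa using hmod)
      · exact hall k (by omega) hkk
    · intro hall k hik hkk
      exact hall k (by omega) hkk
  | case3 i h =>
    simp only [true_iff]
    intro k hik hkk
    exact absurd hkk (by nlinarith)

-- the classical sqrt criterion, over Int
lemma sqrt_criterion (n : Int) (hn : 2 ≤ n) :
    (∀ i : Int, 2 ≤ i → i < n → ¬ i ∣ n) ↔ (∀ k : Int, 2 ≤ k → k * k ≤ n → ¬ k ∣ n) := by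
  constructor
  · intro h k h2 hk hdvd
    have hkn : k < n := by nlinarith
    exact h k h2 hkn hdvd
  · intro h i h2 hin hdvd
    obtain ⟨j, hj⟩ := hdvd
    have hj2 : 2 ≤ j := by
      rcases lt_or_ge 0 j with h0 | h0
      · by_contra hlt
        have : j = 1 := by omega
        subst this; omega
      · nlinarith
    rcases lt_or_ge n (i * i) with hii | hii
    · have hji : j < i := by nlinarith
      have hjj : j * j ≤ n := by nlinarith
      exact h j hj2 hjj ⟨i, by rw [hj]; ring⟩
    · exact h i h2 hii ⟨j, hj⟩

-- the count in prime_num equals 1 iff num has no proper divisor in [2, num)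
lemma countP_eq_one_iff (n : Int) (hn : 2 ≤ n) :
    (PySem.List.pyRange 2 (n + 1) 1).countP (fun i => PySem.Int.mod n i == 0) = 1 ↔
      ∀ i : Int, 2 ≤ i → i < n → ¬ i ∣ n := by
  rw [PySem.List.pyRange_one_succ_right hn, List.countP_append]
  have hself : PySem.Int.mod n n = 0 := (PySem.Int.mod_eq_zero_iff_dvd n n).mpr dvd_rfl
  simp [hself]
  simp [PySem.Int.mod_eq_zero_iff_dvd]

-- the two primality tests agree on every Int
lemma prime_eq (n : Int) : pvPrimeNum n = pvIsPrimeB n := by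
  rcases lt_or_ge n 2 with hn | hn
  · rw [pvPrimeNum_eq_countP]
    rw [PySem.List.pyRange_one_eq_nil (by omega)]
    simp [pvIsPrimeB, hn]
  · rw [Bool.eq_iff_iff, pvPrimeNum_eq_countP]
    simp only [pvIsPrimeB, if_neg (by omega : ¬ n < 2)]
    rw [decide_eq_true_iff, countP_eq_one_iff n hn, sqrt_criterion n hn,
      pvTrial_iff n 2 (by omega)]

-- A's two foldl-append loops are two filters, fused into one
lemma backwardsPrime_eq_filter (start stop : Int) :
    backwardsPrime start stop =
      (PySem.List.pyRange start (stop + 1) 1).filter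
        (fun n => (pvPrimeNum (pvRevInt n) && decide (11 < n)) && pvPrimeNum n) := by
  unfold backwardsPrime
  rw [PySem.List.foldl_append_if_eq_filter, PySem.List.foldl_append_if_eq_filter]
  simp [List.filter_filter]

-- ===== VERDICT (by name: the statement is the Claim_ definition above) =====
theorem backwardsPrime_spec : Claim_equal_backwardsPrime := by
  intro start stop _
  unfold Spec_backwardsPrime
  rw [backwardsPrime_eq_filter]
  unfold backwardsPrime_alt
  have hMs : start ≤ max start 12 := le_max_left _ _
  have hM12 : (12 : Int) ≤ max start 12 := le_max_right _ _
  have hMc : max start 12 = start ∨ max start 12 = 12 := (max_choice _ _)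
  rcases lt_or_ge (max start 12) (stop + 1) with h | h
  · rw [PySem.List.pyRange_one_append start (max start 12) (stop + 1) hMs (le_of_lt h),
      List.filter_append]
    have hfirst :
        (PySem.List.pyRange start (max start 12) 1).filter
          (fun n => (pvPrimeNum (pvRevInt n) && decide (11 < n)) && pvPrimeNum n) = [] := by
      rw [List.filter_eq_nil_iff]
      intro a ha
      obtain ⟨h1, h2⟩ := (PySem.List.mem_pyRange_one).mp ha
      have : ¬ (11 < a) := by omega
      simp [this]
    rw [hfirst, List.nil_append]
    apply List.filter_congr
    intro a ha
    obtain ⟨h1, h2⟩ := (PySem.List.mem_pyRange_one).mp ha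
    have h11 : 11 < a := by omega
    simp [prime_eq, h11, Bool.and_comm]
  · rw [PySem.List.pyRange_one_eq_nil h, List.filter_nil, List.filter_eq_nil_iff]
    intro a ha
    obtain ⟨h1, h2⟩ := (PySem.List.mem_pyRange_one).mp ha
    have : ¬ (11 < a) := by omega
    simp [this]
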